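-- pv_equiv track=rewrite | github.com/chikatetsu/song-rating-server | graph.py | sort_graph
-- ===== SOURCE A (Python) =====
-- def topological_sort(graph):
--     visited = {}
--
--     def get_deepness(node):
--         if node in visited:
--             return visited[node]
--         if graph[node] == []:
--             visited[node] = 0
--             return 0
--         max_deepness = 0
--         for n in graph[node]:
--             deepness = get_deepness(n) + 1
--             if deepness > max_deepness:
--                 max_deepness = deepness
--         visited[node] = max_deepness
--         return max_deepness
--
--     for node in graph:
--         if node not in visited:
--             get_deepness(node)
--
--     return sorted(visited, key=visited.get, reverse=True)
--
-- def sort_graph(compressed, scc):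
--     order = topological_sort(compressed)
--     rates = []
--     for i in order:
--         val = scc[i]
--         if isinstance(val, list):
--             rates.extend(val)
--         else:
--             rates.append(val)
--     return rates
-- ===== SOURCE B (Python) =====
-- def sort_graph(compressed, scc):
--     # iterative explicit-stack DFS computing longest-path depths in post-order,
--     # instead of the recursive memoized helper
--     visited = {}
--     for start in compressed:
--         if start in visited:
--             continue
--         stack = [(start, compressed[start], 0)]
--         while stack:
--             node, rem, m = stack[-1]
--             if not rem:
--                 stack.pop()
--                 visited[node] = m
--             else:
--                 s = rem[0]
--                 if s in visited:
--                     stack[-1] = (node, rem[1:], max(m, visited[s] + 1))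
--                 else:
--                     stack.append((s, compressed[s], 0))
--     rates = []
--     for i in sorted(visited, key=visited.get, reverse=True):
--         val = scc[i]
--         if isinstance(val, list):
--             rates.extend(val)
--         else:
--             rates.append(val)
--     return rates
-- ===== Notes on version B (the rewrite author's own statement) =====
-- stated objective: alternative
-- what changed: The recursive memoized get_deepness helper is replaced by an explicit-stack iterative DFS (worklist of (node, remaining successors, running max) frames) that records each node's longest-path depth in the same post-order; the stable descending sort and the extend/append flatten step are unchanged.
import Mathlib
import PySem

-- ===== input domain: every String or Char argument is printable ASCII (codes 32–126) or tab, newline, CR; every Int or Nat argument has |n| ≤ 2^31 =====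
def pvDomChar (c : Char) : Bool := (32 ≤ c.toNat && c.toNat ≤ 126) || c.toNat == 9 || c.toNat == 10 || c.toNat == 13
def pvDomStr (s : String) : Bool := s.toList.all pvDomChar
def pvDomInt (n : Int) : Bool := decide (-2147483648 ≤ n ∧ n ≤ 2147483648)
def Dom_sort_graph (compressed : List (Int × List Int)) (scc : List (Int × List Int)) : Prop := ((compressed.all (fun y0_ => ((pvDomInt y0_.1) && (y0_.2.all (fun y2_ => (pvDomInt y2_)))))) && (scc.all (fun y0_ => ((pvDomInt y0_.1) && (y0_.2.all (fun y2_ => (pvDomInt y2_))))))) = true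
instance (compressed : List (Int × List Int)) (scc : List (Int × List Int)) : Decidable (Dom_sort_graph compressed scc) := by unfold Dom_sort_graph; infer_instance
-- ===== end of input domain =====

-- B replaces A's recursive memoized depth helper by an explicit-stack iterative DFS
-- with the same post-order completion order (objective: alternative; return value only).


-- ===== PORT A =====
-- get_deepness / the loop over its successors, with a fuel guard (`none` = fuel exhausted,
-- which never happens on inputs satisfying Pre_: Python A would hit unbounded recursion there).
mutual
def pvGetDeep (g : PySem.Dict Int (List Int)) : Nat → Int → PySem.Dict Int Int → Option (PySem.Dict Int Int × Int)
  | 0, _, _ => none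
  | f + 1, node, visited =>
    match visited.get? node with
    | some d => some (visited, d)
    | none =>
      -- graph[node]: a missing key is a KeyError in Python; Pre_ excludes it (getD [] is a guard)
      if g.getD node [] = [] then some (visited.insert node 0, 0)
      else
        match pvGetDeepFold g f (g.getD node []) visited 0 with
        | none => none
        | some (v2, m) => some (v2.insert node m, m)
  termination_by f => (f, 0)

def pvGetDeepFold (g : PySem.Dict Int (List Int)) : Nat → List Int → PySem.Dict Int Int → Int → Option (PySem.Dict Int Int × Int)
  | _, [], visited, m => some (visited, m)
  | f, n :: ns, visited, m =>
    match pvGetDeep g f n visited with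
    | none => none
    | some (v1, d) => pvGetDeepFold g f ns v1 (if d + 1 > m then d + 1 else m)
  termination_by f ns => (f, ns.length + 1)
end

def sort_graph (compressed : List (Int × List Int)) (scc : List (Int × List Int)) : List Int :=
  let g := PySem.Dict.mk compressed
  let visited := g.keys.foldl (fun v node =>
      if v.contains node then v
      else
        match pvGetDeep g (g.size + 2) node v with
        | some r => r.1
        | none => v) PySem.Dict.empty
  let order := PySem.List.sorted visited.keys (fun k => visited.getD k 0) true
  -- the extend/append loop: under the declared type scc[i] is always a list, so `extend`
  order.foldl (fun rates i => rates ++ (PySem.Dict.mk scc).getD i []) []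

-- ===== PORT B =====
-- the while loop over the explicit stack; one fuel unit per iteration (`none` = fuel exhausted,
-- never reached on inputs satisfying Pre_: Python B's loop would not terminate there).
def pvRun (g : PySem.Dict Int (List Int)) :
    Nat → List (Int × List Int × Int) → PySem.Dict Int Int → Option (PySem.Dict Int Int)
  | _, [], visited => some visited
  | 0, _ :: _, _ => none
  | f + 1, (node, rem, m) :: rest, visited =>
    match rem with
    | [] => pvRun g f rest (visited.insert node m)
    | s :: rem' =>
      match visited.get? s with
      | some d => pvRun g f ((node, rem', max m (d + 1)) :: rest) visited
      | none => pvRun g f ((s, g.getD s [], 0) :: (node, s :: rem', m) :: rest) visited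

def sort_graph_alt (compressed : List (Int × List Int)) (scc : List (Int × List Int)) : List Int :=
  let g := PySem.Dict.mk compressed
  -- fuel: an upper bound on the number of loop iterations on inputs satisfying Pre_
  let fuel := (3 * (g.values.map List.length).sum + 3) ^ (g.size + 2)
  let visited := g.keys.foldl (fun v start =>
      if v.contains start then v
      else
        match pvRun g fuel [(start, g.getD start [], 0)] v with
        | some v' => v'
        | none => v) PySem.Dict.empty
  let order := PySem.List.sorted visited.keys (fun k => visited.getD k 0) true
  -- B's extend/append loop, identical to A's: scc[i] is always a list under the declared type
  order.foldl (fun rates i => rates ++ (PySem.Dict.mk scc).getD i []) []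

-- ===== PRECONDITION & SPEC =====
-- successors of a node, the one-step expansion of a node set, and bounded-iterate reachability
def pvSuccs (g : PySem.Dict Int (List Int)) (x : Int) : List Int := g.getD x []
def pvStepSet (g : PySem.Dict Int (List Int)) (S : Finset Int) : Finset Int :=
  S ∪ S.biUnion (fun x => (pvSuccs g x).toFinset)
def pvReach (g : PySem.Dict Int (List Int)) (x : Int) : Finset Int :=
  (pvStepSet g)^[g.size + 1] (pvSuccs g x).toFinset

-- Pre_ excludes exactly the inputs where Python A does not return: an edge to a node that is not
-- a key of `compressed` (KeyError), a cycle (unbounded recursion / RecursionError), or a node of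
-- `compressed` missing from `scc` (KeyError in the flatten loop).
def Pre_sort_graph (compressed : List (Int × List Int)) (scc : List (Int × List Int)) : Prop :=
  (∀ k ∈ (PySem.Dict.mk compressed).keys, ∀ s ∈ pvSuccs (PySem.Dict.mk compressed) k,
      s ∈ (PySem.Dict.mk compressed).keys) ∧
  (∀ k ∈ (PySem.Dict.mk compressed).keys, k ∉ pvReach (PySem.Dict.mk compressed) k) ∧
  (∀ k ∈ (PySem.Dict.mk compressed).keys, (PySem.Dict.mk scc).contains k = true)
instance (compressed : List (Int × List Int)) (scc : List (Int × List Int)) :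
    Decidable (Pre_sort_graph compressed scc) := by unfold Pre_sort_graph; infer_instance

def pvWitness_sort_graph : (List (Int × List Int)) × (List (Int × List Int)) :=
  ([(0, [1]), (1, [])], [(0, [10]), (1, [11, 12])])

def Spec_sort_graph (compressed : List (Int × List Int)) (scc : List (Int × List Int)) (out : List Int) : Prop := out = sort_graph_alt compressed scc
instance (compressed : List (Int × List Int)) (scc : List (Int × List Int)) (out : List Int) : Decidable (Spec_sort_graph compressed scc out) := by unfold Spec_sort_graph; infer_instance

-- ===== CLAIM (what is proved, stated in full; the proofs are below) =====
def Claim_equal_sort_graph : Prop := ∀ (compressed : List (Int × List Int)) (scc : List (Int × List Int)), Dom_sort_graph compressed scc → Pre_sort_graph compressed scc → Spec_sort_graph compressed scc (sort_graph compressed scc)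

-- ===== LEMMAS AND PROOFS =====

-- `if d+1 > m then d+1 else m` (A's running max) is `max m (d+1)` (B's)
theorem pvMaxEq (m d : Int) : (if d + 1 > m then d + 1 else m) = max m (d + 1) := by
  split <;> omega

-- after a converging call, the node is recorded with its returned depth
theorem pvGetDeep_lookup (g : PySem.Dict Int (List Int)) (f : Nat) (node : Int)
    (v v' : PySem.Dict Int Int) (d : Int) (h : pvGetDeep g f node v = some (v', d)) :
    v'.get? node = some d := by
  match f with
  | 0 => simp [pvGetDeep] at h
  | f + 1 =>
    rw [pvGetDeep] at h
    rcases hv : v.get? node with _ | d0 <;> rw [hv] at h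
    · simp only at h
      split at h
      · simp only [Option.some.injEq, Prod.mk.injEq] at h
        rcases h with ⟨h1, h2⟩
        subst h1; subst h2
        exact PySem.Dict.get?_insert_self _ _ _
      · rcases hr : pvGetDeepFold g f (g.getD node []) v 0 with _ | ⟨v2, m⟩ <;> rw [hr] at h
        · simp at h
        · simp only [Option.some.injEq, Prod.mk.injEq] at h
          rcases h with ⟨h1, h2⟩
          subst h1; subst h2
          exact PySem.Dict.get?_insert_self _ _ _
    · simp only [Option.some.injEq, Prod.mk.injEq] at h
      rcases h with ⟨h1, h2⟩
      subst h1; subst h2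
      exact hv

-- the machine runs from state (S, v) to state (S', v') in exactly k iterations
def pvSteps (g : PySem.Dict Int (List Int)) (k : Nat)
    (S : List (Int × List Int × Int)) (v : PySem.Dict Int Int)
    (S' : List (Int × List Int × Int)) (v' : PySem.Dict Int Int) : Prop :=
  ∀ f, pvRun g (f + k) S v = pvRun g f S' v'

def pvKB (g : PySem.Dict Int (List Int)) (f : Nat) : Nat :=
  (3 * (g.values.map List.length).sum + 3) ^ f

theorem pvKB_pos (g : PySem.Dict Int (List Int)) (f : Nat) : 1 ≤ pvKB g f :=
  Nat.one_le_pow _ _ (by omega)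

theorem pvLenBound (g : PySem.Dict Int (List Int)) (x : Int) :
    (g.getD x []).length ≤ (g.values.map List.length).sum := by
  rcases h : g.get? x with _ | l
  · simp [PySem.Dict.getD_of_get?_eq_none _ _ h]
  · rw [PySem.Dict.getD_of_get?_eq_some _ _ h]
    have hm : l ∈ g.values := by
      have := PySem.Dict.mem_items_of_get?_eq_some (d := g) h
      simp only [PySem.Dict.values, List.mem_map]
      exact ⟨(x, l), this, rfl⟩
    exact List.le_sum_of_mem (List.mem_map_of_mem hm)

-- single machine iterations, for any fuel
theorem pvStep_pop (g : PySem.Dict Int (List Int)) (f : Nat) (node : Int) (m : Int)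
    (rest : List (Int × List Int × Int)) (v : PySem.Dict Int Int) :
    pvRun g (f + 1) ((node, [], m) :: rest) v = pvRun g f rest (v.insert node m) := rfl

theorem pvStep_consume (g : PySem.Dict Int (List Int)) (f : Nat) (node s : Int)
    (rem' : List Int) (m d : Int) (rest : List (Int × List Int × Int))
    (v : PySem.Dict Int Int) (h : v.get? s = some d) :
    pvRun g (f + 1) ((node, s :: rem', m) :: rest) v
      = pvRun g f ((node, rem', max m (d + 1)) :: rest) v := by
  rw [pvRun, h]

theorem pvStep_push (g : PySem.Dict Int (List Int)) (f : Nat) (node s : Int)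
    (rem' : List Int) (m : Int) (rest : List (Int × List Int × Int))
    (v : PySem.Dict Int Int) (h : v.get? s = none) :
    pvRun g (f + 1) ((node, s :: rem', m) :: rest) v
      = pvRun g f ((s, g.getD s [], 0) :: (node, s :: rem', m) :: rest) v := by
  rw [pvRun, h]

-- bridge, depth side: a converging recursive call is simulated by the machine frame
def pvBridgeD (g : PySem.Dict Int (List Int)) (f : Nat) : Prop :=
  ∀ node v v' d st, v.get? node = none → pvGetDeep g f node v = some (v', d) →
    ∃ k ≤ pvKB g f, pvSteps g k ((node, g.getD node [], 0) :: st) v st v'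

theorem pvBridgeF (g : PySem.Dict Int (List Int)) (f : Nat) (hD : pvBridgeD g f) :
    ∀ rem v m v2 m2 node st, pvGetDeepFold g f rem v m = some (v2, m2) →
      ∃ k ≤ rem.length * (pvKB g f + 2) + 1,
        pvSteps g k ((node, rem, m) :: st) v st (v2.insert node m2) := by
  intro rem
  induction rem with
  | nil =>
    intro v m v2 m2 node st h
    rw [pvGetDeepFold] at h
    simp only [Option.some.injEq, Prod.mk.injEq] at h
    rcases h with ⟨h1, h2⟩; subst h1; subst h2
    refine ⟨1, by omega, ?_⟩
    intro f'
    exact pvStep_pop g f' node m st v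
  | cons s ns ih =>
    intro v m v2 m2 node st h
    rw [pvGetDeepFold] at h
    rcases hd : pvGetDeep g f s v with _ | ⟨v1, d⟩ <;> rw [hd] at h
    · simp at h
    · simp only at h
      rw [pvMaxEq] at h
      rcases hv : v.get? s with _ | d0
      · -- s not yet visited: push, run the child, then consume
        obtain ⟨kd, hkd, stepsD⟩ := hD s v v1 d ((node, s :: ns, m) :: st) hv hd
        have hl : v1.get? s = some d := pvGetDeep_lookup g f s v v1 d hd
        obtain ⟨k1, hk1, steps1⟩ := ih v1 (max m (d + 1)) v2 m2 node st h
        refine ⟨k1 + 1 + kd + 1, ?_, ?_⟩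
        · have hKB := pvKB_pos g f
          have : (ns.length + 1) * (pvKB g f + 2)
              = ns.length * (pvKB g f + 2) + (pvKB g f + 2) := by ring
          simp only [List.length_cons]
          omega
        · intro f'
          have e1 : f' + (k1 + 1 + kd + 1) = (f' + k1 + 1 + kd) + 1 := by omega
          rw [e1, pvStep_push g _ node s ns m st v hv]
          have e2 := stepsD (f' + k1 + 1)
          rw [e2, pvStep_consume g _ node s ns m d st v1 hl]
          exact steps1 f'
      · -- s already visited: the recursive call returned the memo
        match f with
        | 0 => simp [pvGetDeep] at hd
        | f'' + 1 =>
          rw [pvGetDeep, hv] at hd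
          simp only [Option.some.injEq, Prod.mk.injEq] at hd
          rcases hd with ⟨h1, h2⟩; subst h1; subst h2
          obtain ⟨k1, hk1, steps1⟩ := ih v (max m (d0 + 1)) v2 m2 node st h
          refine ⟨k1 + 1, ?_, ?_⟩
          · have hKB := pvKB_pos g (f'' + 1)
            have : (ns.length + 1) * (pvKB g (f'' + 1) + 2)
                = ns.length * (pvKB g (f'' + 1) + 2) + (pvKB g (f'' + 1) + 2) := by ring
            simp only [List.length_cons]
            omega
          · intro f'
            have e1 : f' + (k1 + 1) = (f' + k1) + 1 := by omega
            rw [e1, pvStep_consume g _ node s ns m d0 st v hv]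
            exact steps1 f'

theorem pvBridgeD_all (g : PySem.Dict Int (List Int)) : ∀ f, pvBridgeD g f := by
  intro f
  induction f with
  | zero =>
    intro node v v' d st hv h
    simp [pvGetDeep] at h
  | succ f ih =>
    intro node v v' d st hv h
    rw [pvGetDeep, hv] at h
    simp only at h
    split at h
    · next he =>
      simp only [Option.some.injEq, Prod.mk.injEq] at h
      rcases h with ⟨h1, h2⟩; subst h1; subst h2
      refine ⟨1, pvKB_pos g (f + 1), ?_⟩
      intro f'
      rw [he]
      exact pvStep_pop g f' node 0 st v
    · next he =>
      rcases hr : pvGetDeepFold g f (g.getD node []) v 0 with _ | ⟨v2, m⟩ <;> rw [hr] at h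
      · simp at h
      · simp only [Option.some.injEq, Prod.mk.injEq] at h
        rcases h with ⟨h1, h2⟩; subst h1; subst h2
        obtain ⟨k, hk, steps⟩ := pvBridgeF g f ih (g.getD node []) v 0 v2 m node st hr
        refine ⟨k, ?_, steps⟩
        have hL := pvLenBound g node
        have hKB := pvKB_pos g f
        have hpow : pvKB g (f + 1)
            = pvKB g f * (3 * (g.values.map List.length).sum + 3) := by
          simp [pvKB, pow_succ]
        rw [hpow]
        nlinarith [hk, hL, hKB]

-- ---- reachability / termination ----

theorem pvStepSet_infl (g : PySem.Dict Int (List Int)) (S : Finset Int) : S ⊆ pvStepSet g S :=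
  Finset.subset_union_left

theorem pvSubset_iterate (g : PySem.Dict Int (List Int)) (S : Finset Int) (n : Nat) :
    S ⊆ (pvStepSet g)^[n] S := by
  induction n with
  | zero => simp
  | succ n ih =>
    rw [Function.iterate_succ_apply']
    exact ih.trans (pvStepSet_infl g _)

theorem pvStepSet_subset (g : PySem.Dict Int (List Int))
    (hcl : ∀ k ∈ g.keys, ∀ s ∈ pvSuccs g k, s ∈ g.keys)
    (T : Finset Int) (hT : T ⊆ g.keys.toFinset) : pvStepSet g T ⊆ g.keys.toFinset := by
  unfold pvStepSet
  refine Finset.union_subset hT (Finset.biUnion_subset.mpr ?_)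
  intro x hx s hs
  rw [List.mem_toFinset] at hs
  rw [List.mem_toFinset]
  exact hcl x (by simpa using hT hx) s hs

theorem pvIterate_subset (g : PySem.Dict Int (List Int))
    (hcl : ∀ k ∈ g.keys, ∀ s ∈ pvSuccs g k, s ∈ g.keys)
    (S : Finset Int) (hS : S ⊆ g.keys.toFinset) (n : Nat) :
    (pvStepSet g)^[n] S ⊆ g.keys.toFinset := by
  induction n with
  | zero => simpa using hS
  | succ n ih =>
    rw [Function.iterate_succ_apply']
    exact pvStepSet_subset g hcl _ ih

theorem pvChain_card (g : PySem.Dict Int (List Int)) (S : Finset Int) (n : Nat)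
    (h : ∀ j < n, (pvStepSet g)^[j + 1] S ≠ (pvStepSet g)^[j] S) :
    S.card + n ≤ ((pvStepSet g)^[n] S).card := by
  induction n with
  | zero => simp
  | succ n ih =>
    have hn := ih (fun j hj => h j (by omega))
    have hne := h n (by omega)
    have hstrict : (pvStepSet g)^[n] S ⊂ (pvStepSet g)^[n + 1] S := by
      rw [Function.iterate_succ_apply']
      exact HasSubset.Subset.ssubset_of_ne (pvStepSet_infl g _)
        (fun he => hne (by rw [Function.iterate_succ_apply']; exact he.symm))
    have := Finset.card_lt_card hstrict
    omega

theorem pvFix_propagate (g : PySem.Dict Int (List Int)) (S : Finset Int) (i : Nat)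
    (hfix : (pvStepSet g)^[i + 1] S = (pvStepSet g)^[i] S) :
    ∀ m, (pvStepSet g)^[i + m] S = (pvStepSet g)^[i] S := by
  intro m
  induction m with
  | zero => rfl
  | succ m ih =>
    have he : i + (m + 1) = (i + m) + 1 := by omega
    rw [he, Function.iterate_succ_apply', ih]
    calc pvStepSet g ((pvStepSet g)^[i] S)
        = (pvStepSet g)^[i + 1] S := (Function.iterate_succ_apply' _ _ _).symm
      _ = (pvStepSet g)^[i] S := hfix

theorem pvReach_fixed (g : PySem.Dict Int (List Int))
    (hcl : ∀ k ∈ g.keys, ∀ s ∈ pvSuccs g k, s ∈ g.keys)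
    (x : Int) (hx : x ∈ g.keys) :
    pvStepSet g (pvReach g x) = pvReach g x := by
  have hS0 : (pvSuccs g x).toFinset ⊆ g.keys.toFinset := by
    intro s hs
    rw [List.mem_toFinset] at hs ⊢
    exact hcl x hx s hs
  have hcard : g.keys.toFinset.card ≤ g.size := by
    have := List.toFinset_card_le g.keys
    simpa [PySem.Dict.keys, PySem.Dict.size] using this
  have hex : ∃ i ≤ g.keys.toFinset.card,
      (pvStepSet g)^[i + 1] (pvSuccs g x).toFinset = (pvStepSet g)^[i] (pvSuccs g x).toFinset := by
    by_contra hno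
    push Not at hno
    have hchain := pvChain_card g (pvSuccs g x).toFinset (g.keys.toFinset.card + 1)
      (fun j hj => hno j (by omega))
    have hsub := pvIterate_subset g hcl (pvSuccs g x).toFinset hS0 (g.keys.toFinset.card + 1)
    have := Finset.card_le_card hsub
    omega
  obtain ⟨i, hi, hfix⟩ := hex
  have h1 : pvReach g x = (pvStepSet g)^[i] (pvSuccs g x).toFinset := by
    unfold pvReach
    have : g.size + 1 = i + (g.size + 1 - i) := by omega
    rw [this]
    exact pvFix_propagate g _ i hfix _
  have h2 : pvStepSet g (pvReach g x)
      = (pvStepSet g)^[i + 1] (pvSuccs g x).toFinset := by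
    rw [h1]
    exact (Function.iterate_succ_apply' _ _ _).symm
  rw [h2, hfix, ← h1]

theorem pvReach_closed (g : PySem.Dict Int (List Int))
    (hcl : ∀ k ∈ g.keys, ∀ s ∈ pvSuccs g k, s ∈ g.keys)
    (x : Int) (hx : x ∈ g.keys) (y : Int) (hy : y ∈ pvReach g x)
    (s : Int) (hs : s ∈ pvSuccs g y) : s ∈ pvReach g x := by
  rw [← pvReach_fixed g hcl x hx]
  unfold pvStepSet
  refine Finset.mem_union_right _ ?_
  rw [Finset.mem_biUnion]
  exact ⟨y, hy, by simpa using hs⟩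

theorem pvSuccs_subset_reach (g : PySem.Dict Int (List Int)) (x : Int) (s : Int)
    (hs : s ∈ pvSuccs g x) : s ∈ pvReach g x :=
  pvSubset_iterate g _ _ (by simpa using hs)

theorem pvClosed_subset (g : PySem.Dict Int (List Int))
    (hcl : ∀ k ∈ g.keys, ∀ s ∈ pvSuccs g k, s ∈ g.keys)
    (x : Int) (hx : x ∈ g.keys) (T : Finset Int) (hT : T ⊆ pvReach g x) :
    pvStepSet g T ⊆ pvReach g x := by
  unfold pvStepSet
  refine Finset.union_subset hT (Finset.biUnion_subset.mpr ?_)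
  intro y hy s hs
  rw [List.mem_toFinset] at hs
  exact pvReach_closed g hcl x hx y (hT hy) s hs

theorem pvReach_mono_succ (g : PySem.Dict Int (List Int))
    (hcl : ∀ k ∈ g.keys, ∀ s ∈ pvSuccs g k, s ∈ g.keys)
    (x : Int) (hx : x ∈ g.keys) (s : Int) (hs : s ∈ pvSuccs g x) :
    pvReach g s ⊆ pvReach g x := by
  have hall : ∀ n, (pvStepSet g)^[n] (pvSuccs g s).toFinset ⊆ pvReach g x := by
    intro n
    induction n with
    | zero =>
      intro y hy
      rw [Function.iterate_zero_apply, List.mem_toFinset] at hy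
      exact pvReach_closed g hcl x hx s (pvSuccs_subset_reach g x s hs) y hy
    | succ n ih =>
      rw [Function.iterate_succ_apply']
      exact pvClosed_subset g hcl x hx _ ih
  exact hall (g.size + 1)

theorem pvMu_lt (g : PySem.Dict Int (List Int))
    (hcl : ∀ k ∈ g.keys, ∀ s ∈ pvSuccs g k, s ∈ g.keys)
    (hacyc : ∀ k ∈ g.keys, k ∉ pvReach g k)
    (x : Int) (hx : x ∈ g.keys) (s : Int) (hs : s ∈ pvSuccs g x) :
    (pvReach g s).card < (pvReach g x).card := by
  have hsk : s ∈ g.keys := hcl x hx s hs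
  refine Finset.card_lt_card ?_
  refine HasSubset.Subset.ssubset_of_ne (pvReach_mono_succ g hcl x hx s hs) ?_
  intro he
  exact hacyc s hsk (he ▸ pvSuccs_subset_reach g x s hs)

theorem pvMu_le (g : PySem.Dict Int (List Int))
    (hcl : ∀ k ∈ g.keys, ∀ s ∈ pvSuccs g k, s ∈ g.keys)
    (x : Int) (hx : x ∈ g.keys) : (pvReach g x).card ≤ g.size := by
  have hS0 : (pvSuccs g x).toFinset ⊆ g.keys.toFinset := by
    intro s hsm
    rw [List.mem_toFinset] at hsm ⊢
    exact hcl x hx s hsm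
  have h1 := Finset.card_le_card (pvIterate_subset g hcl _ hS0 (g.size + 1))
  have h2 : g.keys.toFinset.card ≤ g.size := by
    have := List.toFinset_card_le g.keys
    simpa [PySem.Dict.keys, PySem.Dict.size] using this
  exact le_trans (by simpa [pvReach] using h1) h2

-- convergence of A's recursion with fuel exceeding the reach-measure
def pvConvD (g : PySem.Dict Int (List Int)) (f : Nat) : Prop :=
  ∀ node v, node ∈ g.keys → (pvReach g node).card < f →
    ∃ r, pvGetDeep g f node v = some r

theorem pvConvF (g : PySem.Dict Int (List Int))
    (f : Nat) (hD : pvConvD g f) :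
    ∀ rem v m, (∀ s ∈ rem, s ∈ g.keys ∧ (pvReach g s).card < f) →
      ∃ r, pvGetDeepFold g f rem v m = some r := by
  intro rem
  induction rem with
  | nil => intro v m _; exact ⟨(v, m), by rw [pvGetDeepFold]⟩
  | cons s ns ih =>
    intro v m hall
    obtain ⟨⟨v1, d⟩, hd⟩ := hD s v (hall s (by simp)).1 (hall s (by simp)).2
    rw [pvGetDeepFold, hd]
    exact ih v1 _ (fun t ht => hall t (by simp [ht]))

theorem pvConvD_all (g : PySem.Dict Int (List Int))
    (hcl : ∀ k ∈ g.keys, ∀ s ∈ pvSuccs g k, s ∈ g.keys)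
    (hacyc : ∀ k ∈ g.keys, k ∉ pvReach g k) :
    ∀ f, pvConvD g f := by
  intro f
  induction f with
  | zero => intro node v _ hcard; exact absurd hcard (Nat.not_lt_zero _)
  | succ f ih =>
    intro node v hk hcard
    rw [pvGetDeep]
    rcases hv : v.get? node with _ | d
    · simp only
      split
      · exact ⟨_, rfl⟩
      · have hall : ∀ s ∈ g.getD node [], s ∈ g.keys ∧ (pvReach g s).card < f := by
          intro s hsm
          have hsk : s ∈ g.keys := hcl node hk s hsm
          have := pvMu_lt g hcl hacyc node hk s hsm
          exact ⟨hsk, by omega⟩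
        obtain ⟨⟨v2, m⟩, hr⟩ := pvConvF g f ih (g.getD node []) v 0 hall
        rw [hr]
        exact ⟨_, rfl⟩
    · exact ⟨_, rfl⟩

-- ===== VERDICT (by name: the statement is the Claim_ definition above) =====
theorem sort_graph_spec : Claim_equal_sort_graph := by
  intro compressed scc _hdom hpre
  obtain ⟨hcl, hacyc, _hscc⟩ := hpre
  show sort_graph compressed scc = sort_graph_alt compressed scc
  unfold sort_graph sort_graph_alt
  simp only
  set g := PySem.Dict.mk compressed with hg
  have hvis :
      g.keys.foldl (fun v node =>
        if v.contains node then v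
        else
          match pvGetDeep g (g.size + 2) node v with
          | some r => r.1
          | none => v) PySem.Dict.empty
      = g.keys.foldl (fun v start =>
        if v.contains start then v
        else
          match pvRun g ((3 * (g.values.map List.length).sum + 3) ^ (g.size + 2))
              [(start, g.getD start [], 0)] v with
          | some v' => v'
          | none => v) PySem.Dict.empty := by
    apply PySem.List.foldl_congr_mem
    intro v node hnode
    rcases hc : v.contains node with _ | _
    · simp only [Bool.false_eq_true, if_false]
      have hv : v.get? node = none := (PySem.Dict.get?_eq_none_iff_contains v node).mpr hc
      have hlt : (pvReach g node).card < g.size + 2 := by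
        have := pvMu_le g hcl node hnode
        omega
      obtain ⟨⟨v', d⟩, hsome⟩ := pvConvD_all g hcl hacyc (g.size + 2) node v hnode hlt
      rw [hsome]
      obtain ⟨k, hk, hsteps⟩ := pvBridgeD_all g (g.size + 2) node v v' d [] hv hsome
      have hfuel : k ≤ (3 * (g.values.map List.length).sum + 3) ^ (g.size + 2) := by
        simpa [pvKB] using hk
      have hrun : pvRun g ((3 * (g.values.map List.length).sum + 3) ^ (g.size + 2))
          [(node, g.getD node [], 0)] v = some v' := by
        have h2 := hsteps ((3 * (g.values.map List.length).sum + 3) ^ (g.size + 2) - k)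
        rw [Nat.sub_add_cancel hfuel] at h2
        rw [h2, pvRun]
      rw [hrun]
    · simp
  rw [hvis]
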